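-- pv_equiv track=rewrite | github.com/santoram173/santhosh-nl-sql-engine | backend/pipeline/stage5_confidence.py | _has_subquery_complexity
-- ===== SOURCE A (Python) =====
-- def _has_subquery_complexity(sql: str) -> bool:
--     """Detect deeply nested subqueries."""
--     depth = 0
--     max_depth = 0
--     for c in sql:
--         if c == "(":
--             depth += 1
--             max_depth = max(max_depth, depth)
--         elif c == ")":
--             depth -= 1
--     return max_depth >= 4
-- ===== SOURCE B (Python) =====
-- def _has_subquery_complexity(sql: str) -> bool:
--     """Detect deeply nested subqueries via divide and conquer.
--
--     Max nesting depth = maximum prefix sum of the +1/-1 parenthesis deltas.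
--     Computed by recursive halving: for each segment return (total delta,
--     max prefix sum incl. the empty prefix), combined as
--     (s1+s2, max(m1, s1+m2)).
--     """
--     def scan(lo: int, hi: int):
--         if hi - lo == 0:
--             return 0, 0
--         if hi - lo == 1:
--             c = sql[lo]
--             d = 1 if c == "(" else -1 if c == ")" else 0
--             return d, max(0, d)
--         mid = lo + (hi - lo) // 2
--         s1, m1 = scan(lo, mid)
--         s2, m2 = scan(mid, hi)
--         return s1 + s2, max(m1, s1 + m2)
--
--     return scan(0, len(sql))[1] >= 4
-- ===== Notes on version B (the rewrite author's own statement) =====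
-- stated objective: alternative
-- what changed: Replaces A's sequential counter loop (depth + running max) with a divide-and-conquer algorithm: each half of the string is summarised as (total parenthesis delta, max prefix depth) and the summaries are merged as (s1+s2, max(m1, s1+m2)); the max-prefix-sum of the whole string is A's max_depth.
import Mathlib
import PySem

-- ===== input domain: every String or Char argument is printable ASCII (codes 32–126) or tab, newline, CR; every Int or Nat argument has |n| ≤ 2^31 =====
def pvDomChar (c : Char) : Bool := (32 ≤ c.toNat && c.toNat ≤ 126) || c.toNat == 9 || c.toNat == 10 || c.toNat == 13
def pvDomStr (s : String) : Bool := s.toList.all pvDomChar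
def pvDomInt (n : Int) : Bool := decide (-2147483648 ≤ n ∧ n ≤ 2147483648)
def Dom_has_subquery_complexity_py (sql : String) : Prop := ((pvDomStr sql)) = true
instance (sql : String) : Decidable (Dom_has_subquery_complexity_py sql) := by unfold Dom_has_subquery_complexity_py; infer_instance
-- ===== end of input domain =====

-- B replaces A's sequential depth/max_depth counter loop by a divide-and-conquer
-- max-prefix-sum computation over the parenthesis deltas; same O(n) cost, different algorithm.

-- ===== PORT A =====
def has_subquery_complexity_py (sql : String) : Bool :=
  -- depth, max_depth tracked as the fold state, branches in A's order
  let st := sql.toList.foldl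
    (fun (p : Int × Int) c =>
      if c = '(' then (p.1 + 1, max p.2 (p.1 + 1))
      else if c = ')' then (p.1 - 1, p.2)
      else p)
    (0, 0)
  decide (st.2 ≥ 4)

-- ===== PORT B =====
-- Source B's scan(lo, hi): summarise a segment as (total delta, max prefix depth),
-- recursing on the two halves split at the midpoint.
def pvScanDC : List Char → Int × Int
  | [] => (0, 0)
  | [c] =>
    let d : Int := if c = '(' then 1 else if c = ')' then -1 else 0
    (d, max 0 d)
  | c1 :: c2 :: t =>
    -- mid = length / 2; segment summaries p (left half) and q (right half) merged
    ((pvScanDC ((c1 :: c2 :: t).take ((c1 :: c2 :: t).length / 2))).1 +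
       (pvScanDC ((c1 :: c2 :: t).drop ((c1 :: c2 :: t).length / 2))).1,
     max (pvScanDC ((c1 :: c2 :: t).take ((c1 :: c2 :: t).length / 2))).2
       ((pvScanDC ((c1 :: c2 :: t).take ((c1 :: c2 :: t).length / 2))).1 +
        (pvScanDC ((c1 :: c2 :: t).drop ((c1 :: c2 :: t).length / 2))).2))
termination_by cs => cs.length
decreasing_by
  all_goals simp; omega

def has_subquery_complexity_py_alt (sql : String) : Bool :=
  decide ((pvScanDC sql.toList).2 ≥ 4)

-- ===== PRECONDITION & SPEC =====
def Spec_has_subquery_complexity_py (sql : String) (out : Bool) : Prop := out = has_subquery_complexity_py_alt sql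
instance (sql : String) (out : Bool) : Decidable (Spec_has_subquery_complexity_py sql out) := by unfold Spec_has_subquery_complexity_py; infer_instance

-- ===== CLAIM (what is proved, stated in full; the proofs are below) =====
def Claim_equal_has_subquery_complexity_py : Prop := ∀ (sql : String), Dom_has_subquery_complexity_py sql → Spec_has_subquery_complexity_py sql (has_subquery_complexity_py sql)

-- ===== LEMMAS AND PROOFS =====

-- spec functions: total delta and max prefix sum (including the empty prefix)
def pvDelta (c : Char) : Int := if c = '(' then 1 else if c = ')' then -1 else 0

def pvS : List Char → Int
  | [] => 0
  | c :: t => pvDelta c + pvS t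

def pvM : List Char → Int
  | [] => 0
  | c :: t => max 0 (pvDelta c + pvM t)

theorem pvM_nonneg (cs : List Char) : 0 ≤ pvM cs := by
  cases cs <;> simp [pvM]

theorem pvS_append (l r : List Char) : pvS (l ++ r) = pvS l + pvS r := by
  induction l with
  | nil => simp [pvS]
  | cons c t ih => simp [pvS, ih]; ring

theorem pvM_append (l r : List Char) : pvM (l ++ r) = max (pvM l) (pvS l + pvM r) := by
  induction l with
  | nil => have := pvM_nonneg r; simp [pvM, pvS]; omega
  | cons c t ih => simp [pvM, pvS, ih]; omega

theorem pvScanDC_eq (cs : List Char) : pvScanDC cs = (pvS cs, pvM cs) := by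
  induction cs using pvScanDC.induct with
  | case1 => simp [pvScanDC, pvS, pvM]
  | case2 c =>
    simp [pvScanDC, pvS, pvM, pvDelta]
  | case3 c1 c2 t ih1 ih2 =>
    rw [pvScanDC]
    rw [ih1, ih2]
    have hsplit : (c1 :: c2 :: t) =
        (c1 :: c2 :: t).take ((c1 :: c2 :: t).length / 2) ++
        (c1 :: c2 :: t).drop ((c1 :: c2 :: t).length / 2) :=
      (List.take_append_drop _ _).symm
    conv_rhs => rw [hsplit]
    rw [pvS_append, pvM_append]

-- A's fold from a state (d, m) with d ≤ m ends with max_depth = max m (d + pvM cs)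
theorem pvFoldA (cs : List Char) : ∀ (d m : Int), d ≤ m →
    (cs.foldl
      (fun (p : Int × Int) c =>
        if c = '(' then (p.1 + 1, max p.2 (p.1 + 1))
        else if c = ')' then (p.1 - 1, p.2)
        else p)
      (d, m)).2 = max m (d + pvM cs) := by
  induction cs with
  | nil => intro d m h; simp [pvM]; omega
  | cons c t ih =>
    intro d m h
    have hMt := pvM_nonneg t
    by_cases h1 : c = '('
    · simp only [List.foldl_cons, pvM, pvDelta, if_pos h1]
      rw [ih (d + 1) (max m (d + 1)) (le_max_right _ _)]
      omega
    · by_cases h2 : c = ')'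
      · simp only [List.foldl_cons, pvM, pvDelta, if_neg h1, if_pos h2]
        rw [ih (d - 1) m (by omega)]
        omega
      · simp only [List.foldl_cons, pvM, pvDelta, if_neg h1, if_neg h2]
        rw [ih d m h]
        omega

-- ===== VERDICT (by name: the statement is the Claim_ definition above) =====
theorem has_subquery_complexity_py_spec : Claim_equal_has_subquery_complexity_py := by
  intro sql _
  unfold Spec_has_subquery_complexity_py has_subquery_complexity_py has_subquery_complexity_py_alt
  have h := pvFoldA sql.toList 0 0 le_rfl
  have hM := pvM_nonneg sql.toList
  simp only [pvScanDC_eq, h, decide_eq_decide]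
  omega
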